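-- pv_equiv track=rewrite | github.com/soufiane92/MFiX-21.3.2 | mfixgui/bcs.py | bcs_key_valid_for_type
-- ===== SOURCE A (Python) =====
-- def bcs_key_valid_for_type(key, bc_type):
--     # Used in change_bc_type
--     if not key.startswith('bc_'):
--         return True
--     key = key[3:]   # strip 'bc_'
--
--     def T(*types): # type match
--         return any(bc_type.endswith(t) for t in types)
--
--     def K(*keys): # key match
--         return any(key.startswith(k) for k in keys)
--
--     if key in ('type', 'x_e', 'x_w', 'y_s', 'y_n', 'z_b', 'z_t'):
--         return True
--     elif K('c_', 'hw_', 'thetaw_','uw_', 'vw_', 'ww_', 'tw_', 'jj_', 'scalarw'):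
--         return T('W')
--     elif K('bc_dt_0'):
--         return T('MO')
--     elif K('e_turb_g', 'k_turb_g', 'pic_mi_const_statwt', 'theta_m'):
--         return T('I')
--     elif K('ep_', 't_', 'massflow_', 'volflow_'):
--         return T('I', 'O')
--     elif K('p_g'):
--         return T('I', 'PO')
--     elif K('u_', 'v_', 'w_'):
--         return T('W', 'I', 'MO')
--     # if in doubt, keep the key
--     return True
-- ===== SOURCE B (Python) =====
-- # Two independent classifications joined by a lookup table: bc_type is reduced
-- # once to its "ending class"; the key is mapped to a rule id as the MINIMUM id
-- # over a flat (prefix, id) list (order-independent); validity = class in table.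
--
-- _EXACT = frozenset(('type', 'x_e', 'x_w', 'y_s', 'y_n', 'z_b', 'z_t'))
--
-- _PREFIX_RULES = [
--     ('c_', 1), ('hw_', 1), ('thetaw_', 1), ('uw_', 1), ('vw_', 1), ('ww_', 1),
--     ('tw_', 1), ('jj_', 1), ('scalarw', 1),
--     ('bc_dt_0', 2),
--     ('e_turb_g', 3), ('k_turb_g', 3), ('pic_mi_const_statwt', 3), ('theta_m', 3),
--     ('ep_', 4), ('t_', 4), ('massflow_', 4), ('volflow_', 4),
--     ('p_g', 5),
--     ('u_', 6), ('v_', 6), ('w_', 6),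
-- ]
--
-- _ALLOWED = {1: ('W',), 2: ('MO',), 3: ('I',), 4: ('I', 'PO', 'MO', 'O'),
--             5: ('I', 'PO'), 6: ('W', 'I', 'MO')}
--
-- def _ending(bc_type):
--     # the most specific ending class of bc_type ('' if none applies)
--     for e in ('W', 'I', 'PO', 'MO', 'O'):
--         if bc_type.endswith(e):
--             return e
--     return ''
--
-- def bcs_key_valid_for_type(key, bc_type):
--     if not key.startswith('bc_'):
--         return True
--     k = key[3:]
--     if k in _EXACT:
--         return True
--     rule = min((r for p, r in _PREFIX_RULES if k.startswith(p)), default=None)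
--     if rule is None:
--         return True
--     return _ending(bc_type) in _ALLOWED[rule]
-- ===== Notes on version B (the rewrite author's own statement) =====
-- stated objective: alternative
-- what changed: Instead of an if/elif ladder interleaving prefix tests with per-branch endswith checks, B classifies bc_type once into an ending class ('W','I','PO','MO','O' or ''), maps the key to a rule id as the minimum id over a flat order-independent (prefix,id) list, and decides by set membership in an allowed-classes table.
import Mathlib
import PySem

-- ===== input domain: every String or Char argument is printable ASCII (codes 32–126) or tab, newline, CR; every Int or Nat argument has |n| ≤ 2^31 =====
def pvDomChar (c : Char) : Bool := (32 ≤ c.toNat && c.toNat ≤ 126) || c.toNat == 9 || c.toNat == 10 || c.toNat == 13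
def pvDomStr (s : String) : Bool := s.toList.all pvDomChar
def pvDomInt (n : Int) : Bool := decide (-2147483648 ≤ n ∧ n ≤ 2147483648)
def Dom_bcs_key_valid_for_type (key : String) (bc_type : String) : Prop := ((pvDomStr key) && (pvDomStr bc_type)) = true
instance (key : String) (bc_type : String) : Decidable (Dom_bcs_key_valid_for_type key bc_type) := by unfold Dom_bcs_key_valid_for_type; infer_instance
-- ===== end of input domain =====

-- B replaces A's interleaved if/elif ladder by two independent classifications joined by a
-- lookup table: bc_type is reduced once to an ending class, the key to the MINIMUM matching
-- rule id over a flat (prefix, id) list (objective: alternative, same cost).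

-- ===== PORT A =====
def bcs_key_valid_for_type (key : String) (bc_type : String) : Bool :=
  if ¬ PySem.Str.startswith key "bc_" then true
  else
    let key := PySem.Str.slice key (some 3) none   -- key = key[3:]
    let T : List String → Bool := fun types => types.any (fun t => PySem.Str.endswith bc_type t)
    let K : List String → Bool := fun keys => keys.any (fun k => PySem.Str.startswith key k)
    if key ∈ ["type", "x_e", "x_w", "y_s", "y_n", "z_b", "z_t"] then true
    else if K ["c_", "hw_", "thetaw_", "uw_", "vw_", "ww_", "tw_", "jj_", "scalarw"] then T ["W"]
    else if K ["bc_dt_0"] then T ["MO"]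
    else if K ["e_turb_g", "k_turb_g", "pic_mi_const_statwt", "theta_m"] then T ["I"]
    else if K ["ep_", "t_", "massflow_", "volflow_"] then T ["I", "O"]
    else if K ["p_g"] then T ["I", "PO"]
    else if K ["u_", "v_", "w_"] then T ["W", "I", "MO"]
    else true

-- ===== PORT B =====
def bcsExact : List String := ["type", "x_e", "x_w", "y_s", "y_n", "z_b", "z_t"]

def bcsPrefixRules : List (String × Nat) :=
  [("c_", 1), ("hw_", 1), ("thetaw_", 1), ("uw_", 1), ("vw_", 1), ("ww_", 1),
   ("tw_", 1), ("jj_", 1), ("scalarw", 1),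
   ("bc_dt_0", 2),
   ("e_turb_g", 3), ("k_turb_g", 3), ("pic_mi_const_statwt", 3), ("theta_m", 3),
   ("ep_", 4), ("t_", 4), ("massflow_", 4), ("volflow_", 4),
   ("p_g", 5),
   ("u_", 6), ("v_", 6), ("w_", 6)]

def bcsAllowed : List (Nat × List String) :=
  [(1, ["W"]), (2, ["MO"]), (3, ["I"]), (4, ["I", "PO", "MO", "O"]),
   (5, ["I", "PO"]), (6, ["W", "I", "MO"])]

-- _ending: the first ending class of bc_type, "" if none applies
def bcsEnding (bc_type : String) : String :=
  match ["W", "I", "PO", "MO", "O"].find? (fun e => PySem.Str.endswith bc_type e) with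
  | some e => e
  | none => ""

def bcs_key_valid_for_type_alt (key : String) (bc_type : String) : Bool :=
  if ¬ PySem.Str.startswith key "bc_" then true
  else
    let k := PySem.Str.slice key (some 3) none
    if k ∈ bcsExact then true
    else
      -- rule = min((r for p, r in _PREFIX_RULES if k.startswith(p)), default=None)
      match ((bcsPrefixRules.filter (fun pr => PySem.Str.startswith k pr.1)).map Prod.snd).min? with
      | none => true
      | some r => ((bcsAllowed.lookup r).getD []).contains (bcsEnding bc_type)

-- ===== PRECONDITION & SPEC =====
def Spec_bcs_key_valid_for_type (key : String) (bc_type : String) (out : Bool) : Prop := out = bcs_key_valid_for_type_alt key bc_type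
instance (key : String) (bc_type : String) (out : Bool) : Decidable (Spec_bcs_key_valid_for_type key bc_type out) := by unfold Spec_bcs_key_valid_for_type; infer_instance

-- ===== CLAIM (what is proved, stated in full; the proofs are below) =====
def Claim_equal_bcs_key_valid_for_type : Prop := ∀ (key : String) (bc_type : String), Dom_bcs_key_valid_for_type key bc_type → Spec_bcs_key_valid_for_type key bc_type (bcs_key_valid_for_type key bc_type)

-- ===== LEMMAS AND PROOFS =====

theorem bcs_min?_append (xs ys : List Nat) : (xs ++ ys).min? =
    (match xs.min?, ys.min? with
     | none, b => b
     | some a, none => some a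
     | some a, some b => some (min a b)) := by
  induction xs with
  | nil => simp
  | cons x xs ih =>
    cases hx : xs.min? with
    | none =>
      have hxs : xs = [] := by
        cases xs with
        | nil => rfl
        | cons y ys => simp [List.min?_cons] at hx
      subst hxs
      cases hy : ys.min? <;> simp [List.min?_cons, hy]
    | some a =>
      cases hy : ys.min? <;>
        simp [List.min?_cons, ih, hx, hy, Option.elim]

theorem bcs_min?_map_const {α : Type} (x : α) (xs : List α) (r : Nat) :
    ((x :: xs).map (fun _ => r)).min? = some r := by
  induction xs with
  | nil => rfl
  | cons y ys ih => simp_all [List.min?_cons]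

-- one rule group of the flat (prefix, id) list: the minimum is the group's id as soon as one
-- of its prefixes matches, because every id further down the list is ≥ it
theorem bcs_group_step (k : String) (pats : List String) (r : Nat) (rest : List (String × Nat))
    (h : ∀ q ∈ rest, r ≤ q.2) :
    (((pats.map (fun p => (p, r)) ++ rest).filter (fun pr => PySem.Str.startswith k pr.1)).map Prod.snd).min? =
    if pats.any (fun p => PySem.Str.startswith k p) then some r
    else ((rest.filter (fun pr => PySem.Str.startswith k pr.1)).map Prod.snd).min? := by
  rw [List.filter_append, List.map_append, bcs_min?_append]
  have hfm : (pats.map (fun p => (p, r))).filter (fun pr => PySem.Str.startswith k pr.1)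
      = (pats.filter (fun p => PySem.Str.startswith k p)).map (fun p => (p, r)) := by
    rw [List.filter_map]; rfl
  rw [hfm, List.map_map]
  have hcomp : (Prod.snd ∘ fun p : String => (p, r)) = (fun _ => r) := rfl
  rw [hcomp]
  rcases hp : pats.filter (fun p => PySem.Str.startswith k p) with _ | ⟨x, xs⟩
  · have hany : pats.any (fun p => PySem.Str.startswith k p) = false := by
      cases hq : pats.any (fun p => PySem.Str.startswith k p) with
      | false => rfl
      | true =>
        obtain ⟨a, ha, hpa⟩ := List.any_eq_true.mp hq
        have : a ∈ pats.filter (fun p => PySem.Str.startswith k p) := List.mem_filter.mpr ⟨ha, hpa⟩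
        rw [hp] at this
        simp at this
    cases hX : ((rest.filter (fun pr => PySem.Str.startswith k pr.1)).map Prod.snd).min? <;>
      simp only [hany, Bool.false_eq_true, if_false, List.map_nil, List.min?_nil]
  · have hx : x ∈ pats.filter (fun p => PySem.Str.startswith k p) := by rw [hp]; exact List.mem_cons_self
    have hany : pats.any (fun p => PySem.Str.startswith k p) = true :=
      List.any_eq_true.mpr ⟨x, (List.mem_filter.mp hx).1, (List.mem_filter.mp hx).2⟩
    rw [bcs_min?_map_const]
    simp only [hany, if_true]
    cases hX : ((rest.filter (fun pr => PySem.Str.startswith k pr.1)).map Prod.snd).min? with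
    | none => rfl
    | some b =>
      have hb : b ∈ (rest.filter (fun pr => PySem.Str.startswith k pr.1)).map Prod.snd :=
        List.min?_mem hX
      obtain ⟨q, hq, rfl⟩ := List.mem_map.mp hb
      have : r ≤ q.2 := h q (List.mem_filter.mp hq).1
      simp [min_eq_left this]

-- the flat-list minimum equals the first-matching-group id
theorem bcs_minRule (k : String) :
    ((bcsPrefixRules.filter (fun pr => PySem.Str.startswith k pr.1)).map Prod.snd).min? =
    (if ["c_", "hw_", "thetaw_", "uw_", "vw_", "ww_", "tw_", "jj_", "scalarw"].any (fun p => PySem.Str.startswith k p) then some 1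
     else if ["bc_dt_0"].any (fun p => PySem.Str.startswith k p) then some 2
     else if ["e_turb_g", "k_turb_g", "pic_mi_const_statwt", "theta_m"].any (fun p => PySem.Str.startswith k p) then some 3
     else if ["ep_", "t_", "massflow_", "volflow_"].any (fun p => PySem.Str.startswith k p) then some 4
     else if ["p_g"].any (fun p => PySem.Str.startswith k p) then some 5
     else if ["u_", "v_", "w_"].any (fun p => PySem.Str.startswith k p) then some 6
     else none) := by
  have e : bcsPrefixRules =
      ["c_", "hw_", "thetaw_", "uw_", "vw_", "ww_", "tw_", "jj_", "scalarw"].map (fun p => (p, 1)) ++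
      (["bc_dt_0"].map (fun p => (p, 2)) ++
      (["e_turb_g", "k_turb_g", "pic_mi_const_statwt", "theta_m"].map (fun p => (p, 3)) ++
      (["ep_", "t_", "massflow_", "volflow_"].map (fun p => (p, 4)) ++
      (["p_g"].map (fun p => (p, 5)) ++
      (["u_", "v_", "w_"].map (fun p => (p, 6)) ++ ([] : List (String × Nat))))))) := by rfl
  rw [e,
    bcs_group_step k _ 1 _ (by decide), bcs_group_step k _ 2 _ (by decide),
    bcs_group_step k _ 3 _ (by decide), bcs_group_step k _ 4 _ (by decide),
    bcs_group_step k _ 5 _ (by decide), bcs_group_step k _ 6 _ (by decide)]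
  simp

-- endswith facts relating bc_type's ending class to the individual endswith tests
theorem bcs_ew_last {l : List Char} {c : Char} (h : PySem.Chars.endswith l [c] = true) :
    l.getLast? = some c := by
  obtain ⟨t, rfl⟩ := (PySem.Chars.endswith_iff _ _).mp h
  simp

theorem bcs_ew_PO_O {l : List Char} (h : PySem.Chars.endswith l ['P', 'O'] = true) :
    PySem.Chars.endswith l ['O'] = true := by
  exact (PySem.Chars.endswith_iff _ _).mpr
    (List.IsSuffix.trans (l₁ := ['O']) ⟨['P'], rfl⟩ ((PySem.Chars.endswith_iff _ _).mp h))

theorem bcs_ew_MO_O {l : List Char} (h : PySem.Chars.endswith l ['M', 'O'] = true) :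
    PySem.Chars.endswith l ['O'] = true := by
  exact (PySem.Chars.endswith_iff _ _).mpr
    (List.IsSuffix.trans (l₁ := ['O']) ⟨['M'], rfl⟩ ((PySem.Chars.endswith_iff _ _).mp h))

theorem bcs_ew_PO_MO {l : List Char} (hp : PySem.Chars.endswith l ['P', 'O'] = true)
    (hm : PySem.Chars.endswith l ['M', 'O'] = true) : False := by
  obtain ⟨t, ht⟩ := (PySem.Chars.endswith_iff _ _).mp hp
  obtain ⟨u, hu⟩ := (PySem.Chars.endswith_iff _ _).mp hm
  have h2 : t ++ ['P', 'O'] = u ++ ['M', 'O'] := ht.trans hu.symm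
  have h3 := congrArg List.reverse h2
  simp at h3

theorem bcs_ending_cases (bc : String) :
    bcsEnding bc =
    (if PySem.Chars.endswith bc.toList ['W'] = true then "W"
     else if PySem.Chars.endswith bc.toList ['I'] = true then "I"
     else if PySem.Chars.endswith bc.toList ['P', 'O'] = true then "PO"
     else if PySem.Chars.endswith bc.toList ['M', 'O'] = true then "MO"
     else if PySem.Chars.endswith bc.toList ['O'] = true then "O"
     else "") := by
  unfold bcsEnding
  repeat rw [List.find?_cons]
  simp only [PySem.Str.endswith_eq]
  split_ifs <;> simp_all

-- per rule: A's endswith disjunction equals B's class-membership test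
theorem bcs_rule1 (bc : String) :
    (["W"] : List String).any (fun t => PySem.Str.endswith bc t) =
    (["W"] : List String).contains (bcsEnding bc) := by
  rw [bcs_ending_cases bc]
  simp only [List.any_cons, List.any_nil, PySem.Str.endswith_eq]
  by_cases hW : PySem.Chars.endswith bc.toList ['W'] = true <;>
  by_cases hI : PySem.Chars.endswith bc.toList ['I'] = true <;>
  by_cases hPO : PySem.Chars.endswith bc.toList ['P', 'O'] = true <;>
  by_cases hMO : PySem.Chars.endswith bc.toList ['M', 'O'] = true <;>
  by_cases hO : PySem.Chars.endswith bc.toList ['O'] = true <;>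
    first
      | (exact absurd (bcs_ew_last hI) (by rw [bcs_ew_last hW]; simp))
      | (exact absurd (bcs_ew_last hO) (by rw [bcs_ew_last hW]; simp))
      | (exact absurd (bcs_ew_last hO) (by rw [bcs_ew_last hI]; simp))
      | (exact absurd (bcs_ew_PO_O hPO) hO)
      | (exact absurd (bcs_ew_MO_O hMO) hO)
      | (exact (bcs_ew_PO_MO hPO hMO).elim)
      | simp [hW, hI, hPO, hMO, hO]

theorem bcs_rule2 (bc : String) :
    (["MO"] : List String).any (fun t => PySem.Str.endswith bc t) =
    (["MO"] : List String).contains (bcsEnding bc) := by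
  rw [bcs_ending_cases bc]
  simp only [List.any_cons, List.any_nil, PySem.Str.endswith_eq]
  by_cases hW : PySem.Chars.endswith bc.toList ['W'] = true <;>
  by_cases hI : PySem.Chars.endswith bc.toList ['I'] = true <;>
  by_cases hPO : PySem.Chars.endswith bc.toList ['P', 'O'] = true <;>
  by_cases hMO : PySem.Chars.endswith bc.toList ['M', 'O'] = true <;>
  by_cases hO : PySem.Chars.endswith bc.toList ['O'] = true <;>
    first
      | (exact absurd (bcs_ew_last hI) (by rw [bcs_ew_last hW]; simp))
      | (exact absurd (bcs_ew_last hO) (by rw [bcs_ew_last hW]; simp))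
      | (exact absurd (bcs_ew_last hO) (by rw [bcs_ew_last hI]; simp))
      | (exact absurd (bcs_ew_PO_O hPO) hO)
      | (exact absurd (bcs_ew_MO_O hMO) hO)
      | (exact (bcs_ew_PO_MO hPO hMO).elim)
      | simp [hW, hI, hPO, hMO, hO]

theorem bcs_rule3 (bc : String) :
    (["I"] : List String).any (fun t => PySem.Str.endswith bc t) =
    (["I"] : List String).contains (bcsEnding bc) := by
  rw [bcs_ending_cases bc]
  simp only [List.any_cons, List.any_nil, PySem.Str.endswith_eq]
  by_cases hW : PySem.Chars.endswith bc.toList ['W'] = true <;>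
  by_cases hI : PySem.Chars.endswith bc.toList ['I'] = true <;>
  by_cases hPO : PySem.Chars.endswith bc.toList ['P', 'O'] = true <;>
  by_cases hMO : PySem.Chars.endswith bc.toList ['M', 'O'] = true <;>
  by_cases hO : PySem.Chars.endswith bc.toList ['O'] = true <;>
    first
      | (exact absurd (bcs_ew_last hI) (by rw [bcs_ew_last hW]; simp))
      | (exact absurd (bcs_ew_last hO) (by rw [bcs_ew_last hW]; simp))
      | (exact absurd (bcs_ew_last hO) (by rw [bcs_ew_last hI]; simp))
      | (exact absurd (bcs_ew_PO_O hPO) hO)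
      | (exact absurd (bcs_ew_MO_O hMO) hO)
      | (exact (bcs_ew_PO_MO hPO hMO).elim)
      | simp [hW, hI, hPO, hMO, hO]

theorem bcs_rule4 (bc : String) :
    (["I", "O"] : List String).any (fun t => PySem.Str.endswith bc t) =
    (["I", "PO", "MO", "O"] : List String).contains (bcsEnding bc) := by
  rw [bcs_ending_cases bc]
  simp only [List.any_cons, List.any_nil, PySem.Str.endswith_eq]
  by_cases hW : PySem.Chars.endswith bc.toList ['W'] = true <;>
  by_cases hI : PySem.Chars.endswith bc.toList ['I'] = true <;>
  by_cases hPO : PySem.Chars.endswith bc.toList ['P', 'O'] = true <;>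
  by_cases hMO : PySem.Chars.endswith bc.toList ['M', 'O'] = true <;>
  by_cases hO : PySem.Chars.endswith bc.toList ['O'] = true <;>
    first
      | (exact absurd (bcs_ew_last hI) (by rw [bcs_ew_last hW]; simp))
      | (exact absurd (bcs_ew_last hO) (by rw [bcs_ew_last hW]; simp))
      | (exact absurd (bcs_ew_last hO) (by rw [bcs_ew_last hI]; simp))
      | (exact absurd (bcs_ew_PO_O hPO) hO)
      | (exact absurd (bcs_ew_MO_O hMO) hO)
      | (exact (bcs_ew_PO_MO hPO hMO).elim)
      | simp [hW, hI, hPO, hMO, hO]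

theorem bcs_rule5 (bc : String) :
    (["I", "PO"] : List String).any (fun t => PySem.Str.endswith bc t) =
    (["I", "PO"] : List String).contains (bcsEnding bc) := by
  rw [bcs_ending_cases bc]
  simp only [List.any_cons, List.any_nil, PySem.Str.endswith_eq]
  by_cases hW : PySem.Chars.endswith bc.toList ['W'] = true <;>
  by_cases hI : PySem.Chars.endswith bc.toList ['I'] = true <;>
  by_cases hPO : PySem.Chars.endswith bc.toList ['P', 'O'] = true <;>
  by_cases hMO : PySem.Chars.endswith bc.toList ['M', 'O'] = true <;>
  by_cases hO : PySem.Chars.endswith bc.toList ['O'] = true <;>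
    first
      | (exact absurd (bcs_ew_last hI) (by rw [bcs_ew_last hW]; simp))
      | (exact absurd (bcs_ew_last hO) (by rw [bcs_ew_last hW]; simp))
      | (exact absurd (bcs_ew_last hO) (by rw [bcs_ew_last hI]; simp))
      | (exact absurd (bcs_ew_PO_O hPO) hO)
      | (exact absurd (bcs_ew_MO_O hMO) hO)
      | (exact (bcs_ew_PO_MO hPO hMO).elim)
      | simp [hW, hI, hPO, hMO, hO]

theorem bcs_rule6 (bc : String) :
    (["W", "I", "MO"] : List String).any (fun t => PySem.Str.endswith bc t) =
    (["W", "I", "MO"] : List String).contains (bcsEnding bc) := by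
  rw [bcs_ending_cases bc]
  simp only [List.any_cons, List.any_nil, PySem.Str.endswith_eq]
  by_cases hW : PySem.Chars.endswith bc.toList ['W'] = true <;>
  by_cases hI : PySem.Chars.endswith bc.toList ['I'] = true <;>
  by_cases hPO : PySem.Chars.endswith bc.toList ['P', 'O'] = true <;>
  by_cases hMO : PySem.Chars.endswith bc.toList ['M', 'O'] = true <;>
  by_cases hO : PySem.Chars.endswith bc.toList ['O'] = true <;>
    first
      | (exact absurd (bcs_ew_last hI) (by rw [bcs_ew_last hW]; simp))
      | (exact absurd (bcs_ew_last hO) (by rw [bcs_ew_last hW]; simp))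
      | (exact absurd (bcs_ew_last hO) (by rw [bcs_ew_last hI]; simp))
      | (exact absurd (bcs_ew_PO_O hPO) hO)
      | (exact absurd (bcs_ew_MO_O hMO) hO)
      | (exact (bcs_ew_PO_MO hPO hMO).elim)
      | simp [hW, hI, hPO, hMO, hO]

-- ===== VERDICT (by name: the statement is the Claim_ definition above) =====
theorem bcs_key_valid_for_type_spec : Claim_equal_bcs_key_valid_for_type := by
  intro key bc_type _
  unfold Spec_bcs_key_valid_for_type bcs_key_valid_for_type bcs_key_valid_for_type_alt
  dsimp only
  by_cases hsw : PySem.Str.startswith key "bc_" = true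
  · have hc : (¬ PySem.Str.startswith key "bc_" = true) = False := eq_false (not_not_intro hsw)
    simp only [hc, if_false]
    set s := PySem.Str.slice key (some 3) none
    by_cases hex : s ∈ bcsExact
    · have hexA : s ∈ ["type", "x_e", "x_w", "y_s", "y_n", "z_b", "z_t"] := by
        simpa [bcsExact] using hex
      rw [if_pos hexA, if_pos hex]
    · have hexA : s ∉ ["type", "x_e", "x_w", "y_s", "y_n", "z_b", "z_t"] := fun h =>
        hex (by simpa [bcsExact] using h)
      rw [if_neg hexA, if_neg hex, bcs_minRule s]
      by_cases h1 : (["c_", "hw_", "thetaw_", "uw_", "vw_", "ww_", "tw_", "jj_", "scalarw"].any (fun p => PySem.Str.startswith s p)) = true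
      · rw [if_pos h1, if_pos h1]
        simpa [bcsAllowed, List.lookup] using bcs_rule1 bc_type
      · rw [if_neg h1, if_neg h1]
        by_cases h2 : (["bc_dt_0"].any (fun p => PySem.Str.startswith s p)) = true
        · rw [if_pos h2, if_pos h2]
          simpa [bcsAllowed, List.lookup] using bcs_rule2 bc_type
        · rw [if_neg h2, if_neg h2]
          by_cases h3 : (["e_turb_g", "k_turb_g", "pic_mi_const_statwt", "theta_m"].any (fun p => PySem.Str.startswith s p)) = true
          · rw [if_pos h3, if_pos h3]
            simpa [bcsAllowed, List.lookup] using bcs_rule3 bc_type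
          · rw [if_neg h3, if_neg h3]
            by_cases h4 : (["ep_", "t_", "massflow_", "volflow_"].any (fun p => PySem.Str.startswith s p)) = true
            · rw [if_pos h4, if_pos h4]
              simpa [bcsAllowed, List.lookup] using bcs_rule4 bc_type
            · rw [if_neg h4, if_neg h4]
              by_cases h5 : (["p_g"].any (fun p => PySem.Str.startswith s p)) = true
              · rw [if_pos h5, if_pos h5]
                simpa [bcsAllowed, List.lookup] using bcs_rule5 bc_type
              · rw [if_neg h5, if_neg h5]
                by_cases h6 : (["u_", "v_", "w_"].any (fun p => PySem.Str.startswith s p)) = true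
                · rw [if_pos h6, if_pos h6]
                  simpa [bcsAllowed, List.lookup] using bcs_rule6 bc_type
                · rw [if_neg h6, if_neg h6]
  · rw [if_pos hsw, if_pos hsw]
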